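-- pv_equiv track=rewrite | github.com/juancoquet/cracking-the-coding-interview | 05_bit_manipulation.py | next_biggest
-- ===== SOURCE A (Python) =====
-- def next_biggest(bits):
--     if bits == 0:
--         raise ValueError('0 is not a valid input')
--     i = 0
--     while not get_bit(bits, i):
--         i += 1
--
--     bits = clear_bit(bits, i)
--     i += 1
--
--     while get_bit(bits, i):
--         i += 1
--
--     bits = set_bit(bits, i)
--
--     return bits
--
-- def get_bit(num, i):
--     mask = 1 << i
--     return (num & mask) != 0
--
-- def set_bit(num, i):
--     mask = 1 << i
--     return num | mask
--
-- def clear_bit(num, i):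
--     mask = ~(1 << i)
--     return num & mask
-- ===== SOURCE B (Python) =====
-- def next_biggest(bits):
--     if bits == 0:
--         raise ValueError('0 is not a valid input')
--     lb = bits & -bits                              # isolate the lowest set bit
--     return (bits ^ lb) | ((bits + lb) & ~bits)     # clear it, set the bit above the run of ones
-- ===== Notes on version B (the rewrite author's own statement) =====
-- stated objective: simpler
-- what changed: Replaces A's two bit-scanning while loops (find lowest set bit, then find the next clear bit) and its three helper functions by a loop-free closed-form bit trick: lb = bits & -bits isolates the lowest set bit, bits ^ lb clears it, and (bits + lb) & ~bits isolates the single new bit produced by the carry above the run of ones.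
-- outside the precondition, e.g. on next_biggest(0): A raises ValueError, B raises ValueError
import Mathlib
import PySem

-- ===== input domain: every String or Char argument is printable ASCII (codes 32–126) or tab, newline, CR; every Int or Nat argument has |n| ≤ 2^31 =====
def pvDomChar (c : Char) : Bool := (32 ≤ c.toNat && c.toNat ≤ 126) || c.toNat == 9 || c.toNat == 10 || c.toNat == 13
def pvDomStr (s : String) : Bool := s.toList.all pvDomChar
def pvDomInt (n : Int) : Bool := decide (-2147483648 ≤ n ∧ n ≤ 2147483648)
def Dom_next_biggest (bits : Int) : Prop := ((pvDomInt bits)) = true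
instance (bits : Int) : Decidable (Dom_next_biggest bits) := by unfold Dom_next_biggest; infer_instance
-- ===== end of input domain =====

-- B replaces A's two bit-scanning while loops and three helpers by a loop-free closed-form bit trick (objective: simpler).

-- ===== PORT A =====
def get_bit (num : Int) (i : Nat) : Bool := PySem.Int.band num ((1 : Int) <<< i) != 0

def set_bit (num : Int) (i : Nat) : Int := PySem.Int.bor num ((1 : Int) <<< i)

def clear_bit (num : Int) (i : Nat) : Int := PySem.Int.band num (Int.not ((1 : Int) <<< i))

-- `while not get_bit(bits, i): i += 1` — fuel 64 suffices for every input admitted by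
-- Dom_ ∧ Pre_ (|bits| ≤ 2^31, so the scanned index stays well below 64); fuel is only a totality guard.
def nbFindSet (bits : Int) : Nat → Nat → Nat
  | 0, i => i
  | fuel + 1, i => if get_bit bits i then i else nbFindSet bits fuel (i + 1)

-- `while get_bit(bits, i): i += 1` — same totality guard.
def nbFindClear (bits : Int) : Nat → Nat → Nat
  | 0, i => i
  | fuel + 1, i => if get_bit bits i then nbFindClear bits fuel (i + 1) else i

def next_biggest (bits : Int) : Int :=
  if bits = 0 then 0  -- Python raises ValueError here; excluded by Pre_
  else
    let i := nbFindSet bits 64 0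
    let bits1 := clear_bit bits i
    let j := nbFindClear bits1 64 (i + 1)
    set_bit bits1 j

-- ===== PORT B =====
def next_biggest_alt (bits : Int) : Int :=
  if bits = 0 then 0  -- Python raises ValueError here; excluded by Pre_
  else
    let lb := PySem.Int.band bits (-bits)
    PySem.Int.bor (PySem.Int.bxor bits lb) (PySem.Int.band (bits + lb) (Int.not bits))

-- ===== PRECONDITION & SPEC =====
-- Pre_ excludes exactly the inputs on which Python A does not return: bits = 0 (ValueError) and
-- the negative powers of two (bits < 0 with a single set bit in |bits|), on which A's second
-- while loop never terminates.
def Pre_next_biggest (bits : Int) : Prop :=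
  bits ≠ 0 ∧ ¬(bits < 0 ∧ PySem.Int.bitCount bits = 1)
instance (bits : Int) : Decidable (Pre_next_biggest bits) := by unfold Pre_next_biggest; infer_instance

def pvWitness_next_biggest : Int := 5

def Spec_next_biggest (bits : Int) (out : Int) : Prop := out = next_biggest_alt bits
instance (bits : Int) (out : Int) : Decidable (Spec_next_biggest bits out) := by unfold Spec_next_biggest; infer_instance

-- ===== CLAIM (what is proved, stated in full; the proofs are below) =====
def Claim_equal_next_biggest : Prop := ∀ (bits : Int), Dom_next_biggest bits → Pre_next_biggest bits → Spec_next_biggest bits (next_biggest bits)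

-- ===== LEMMAS AND PROOFS =====

-- ---- Nat facts ----

theorem nat_zero_ldiff (n : Nat) : Nat.ldiff 0 n = 0 := by
  apply Nat.zero_of_testBit_eq_false
  intro i
  simp [Nat.testBit_ldiff]

theorem nat_ldiff_self (m : Nat) : Nat.ldiff m m = 0 := by
  apply Nat.zero_of_testBit_eq_false
  intro i
  simp [Nat.testBit_ldiff]

theorem nat_ldiff_zero (m : Nat) : Nat.ldiff m 0 = m := by
  apply Nat.eq_of_testBit_eq
  intro i
  simp [Nat.testBit_ldiff]

theorem nat_and_add_ldiff (m : Nat) : ∀ n : Nat, (m &&& n) + Nat.ldiff m n = m := by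
  induction m using Nat.binaryRec with
  | zero => intro n; simp [nat_zero_ldiff]
  | bit b m ih =>
    intro n
    conv_lhs => rw [← Nat.bit_testBit_zero_shiftRight_one n]
    rw [Nat.land_bit, Nat.ldiff_bit]
    have h := ih (n >>> 1)
    cases b <;> cases hn : n.testBit 0 <;> simp [Nat.bit_val] <;> omega

-- ---- PySem bitwise ops coincide with Mathlib's Int.land/lor/xor/lnot ----

theorem band_eq_land (a b : Int) : PySem.Int.band a b = Int.land a b := by
  cases a with
  | ofNat m =>
    cases b with
    | ofNat n => simp [PySem.Int.band, Int.land]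
    | negSucc n =>
      have h : ¬ (0 ≤ Int.negSucc n) := by simp [Int.negSucc_eq]; omega
      have h2 : (-(Int.negSucc n) - 1).toNat = n := by simp [Int.negSucc_eq]
      simp only [PySem.Int.band, Int.ofNat_eq_natCast, Int.natCast_nonneg, if_true, h, if_false, h2]
      show _ = ((Nat.ldiff m n : Nat) : Int)
      have h3 := nat_and_add_ldiff m n
      simp only [Int.toNat_natCast]
      exact congrArg _ (by omega)
  | negSucc m =>
    cases b with
    | ofNat n =>
      have h : ¬ (0 ≤ Int.negSucc m) := by simp [Int.negSucc_eq]; omega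
      have h2 : (-(Int.negSucc m) - 1).toNat = m := by simp [Int.negSucc_eq]
      simp only [PySem.Int.band, Int.ofNat_eq_natCast, Int.natCast_nonneg, if_true, h, if_false, h2]
      show _ = ((Nat.ldiff n m : Nat) : Int)
      have h3 := nat_and_add_ldiff n m
      simp only [Int.toNat_natCast]
      exact congrArg _ (by omega)
    | negSucc n =>
      have hm : ¬ (0 ≤ Int.negSucc m) := by simp [Int.negSucc_eq]; omega
      have hn : ¬ (0 ≤ Int.negSucc n) := by simp [Int.negSucc_eq]; omega
      have h2 : (-(Int.negSucc m) - 1).toNat = m := by simp [Int.negSucc_eq]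
      have h3 : (-(Int.negSucc n) - 1).toNat = n := by simp [Int.negSucc_eq]
      simp only [PySem.Int.band, hm, hn, if_false, h2, h3]
      show _ = Int.negSucc (m ||| n)
      simp [Int.negSucc_eq]
      ring

theorem bor_eq_lor (a b : Int) : PySem.Int.bor a b = Int.lor a b := by
  cases a with
  | ofNat m =>
    cases b with
    | ofNat n => simp [PySem.Int.bor, Int.lor]
    | negSucc n =>
      have h : ¬ (0 ≤ Int.negSucc n) := by simp [Int.negSucc_eq]; omega
      have h2 : (-(Int.negSucc n) - 1).toNat = n := by simp [Int.negSucc_eq]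
      simp only [PySem.Int.bor, Int.ofNat_eq_natCast, Int.natCast_nonneg, if_true, h, if_false, h2]
      show _ = Int.negSucc (Nat.ldiff n m)
      have h3 := nat_and_add_ldiff n m
      simp only [Int.toNat_natCast, Int.negSucc_eq]
      have h4 : n - (n &&& m) = Nat.ldiff n m := by omega
      rw [h4]
      push_cast
      ring
  | negSucc m =>
    cases b with
    | ofNat n =>
      have h : ¬ (0 ≤ Int.negSucc m) := by simp [Int.negSucc_eq]; omega
      have h2 : (-(Int.negSucc m) - 1).toNat = m := by simp [Int.negSucc_eq]
      simp only [PySem.Int.bor, Int.ofNat_eq_natCast, Int.natCast_nonneg, if_true, h, if_false, h2]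
      show _ = Int.negSucc (Nat.ldiff m n)
      have h3 := nat_and_add_ldiff m n
      simp only [Int.toNat_natCast, Int.negSucc_eq]
      have h4 : m - (m &&& n) = Nat.ldiff m n := by omega
      rw [h4]
      push_cast
      ring
    | negSucc n =>
      have hm : ¬ (0 ≤ Int.negSucc m) := by simp [Int.negSucc_eq]; omega
      have hn : ¬ (0 ≤ Int.negSucc n) := by simp [Int.negSucc_eq]; omega
      have h2 : (-(Int.negSucc m) - 1).toNat = m := by simp [Int.negSucc_eq]
      have h3 : (-(Int.negSucc n) - 1).toNat = n := by simp [Int.negSucc_eq]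
      simp only [PySem.Int.bor, hm, hn, if_false, h2, h3]
      show _ = Int.negSucc (m &&& n)
      simp [Int.negSucc_eq]
      ring

theorem bxor_eq_lxor (a b : Int) : PySem.Int.bxor a b = Int.xor a b := by
  cases a with
  | ofNat m =>
    cases b with
    | ofNat n => simp [PySem.Int.bxor, Int.xor]
    | negSucc n =>
      have h : ¬ (0 ≤ Int.negSucc n) := by simp [Int.negSucc_eq]; omega
      have h2 : (-(Int.negSucc n) - 1).toNat = n := by simp [Int.negSucc_eq]
      simp only [PySem.Int.bxor, Int.ofNat_eq_natCast, Int.natCast_nonneg, if_true, h, if_false, h2]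
      show _ = Int.negSucc (m ^^^ n)
      simp [Int.negSucc_eq]
      ring
  | negSucc m =>
    cases b with
    | ofNat n =>
      have h : ¬ (0 ≤ Int.negSucc m) := by simp [Int.negSucc_eq]; omega
      have h2 : (-(Int.negSucc m) - 1).toNat = m := by simp [Int.negSucc_eq]
      simp only [PySem.Int.bxor, Int.ofNat_eq_natCast, Int.natCast_nonneg, if_true, h, if_false, h2]
      show _ = Int.negSucc (m ^^^ n)
      simp [Int.negSucc_eq]
      ring
    | negSucc n =>
      have hm : ¬ (0 ≤ Int.negSucc m) := by simp [Int.negSucc_eq]; omega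
      have hn : ¬ (0 ≤ Int.negSucc n) := by simp [Int.negSucc_eq]; omega
      have h2 : (-(Int.negSucc m) - 1).toNat = m := by simp [Int.negSucc_eq]
      have h3 : (-(Int.negSucc n) - 1).toNat = n := by simp [Int.negSucc_eq]
      simp only [PySem.Int.bxor, hm, hn, if_false, h2, h3]
      show _ = ((m ^^^ n : Nat) : Int)
      rfl

theorem not_eq_lnot (a : Int) : Int.not a = Int.lnot a := by
  cases a <;> rfl

-- ---- small algebraic facts about Int.bit and the bitwise ops ----

theorem bit_false (n : Int) : Int.bit false n = 2 * n := by simp [Int.bit_val]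

theorem bit_true (n : Int) : Int.bit true n = 2 * n + 1 := by simp [Int.bit_val]

theorem bit_eq_zero (b : Bool) (n : Int) : Int.bit b n = 0 ↔ (n = 0 ∧ b = false) := by
  cases b <;> simp [Int.bit_val] <;> omega

theorem lnot_eq (n : Int) : Int.lnot n = -n - 1 := by
  cases n with
  | ofNat m =>
    show Int.negSucc m = -Int.ofNat m - 1
    rw [Int.negSucc_eq, Int.ofNat_eq_natCast]
    ring
  | negSucc m => show (m : Int) = _; rw [Int.negSucc_eq]; ring

theorem neg_bit_false (n : Int) : -(Int.bit false n) = Int.bit false (-n) := by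
  simp [Int.bit_val]

theorem neg_bit_true (n : Int) : -(Int.bit true n) = Int.bit true (Int.lnot n) := by
  simp [Int.bit_val, lnot_eq]; ring

theorem land_zero (x : Int) : Int.land x 0 = 0 := by
  cases x
  · show ((_ &&& 0 : Nat) : Int) = 0
    simp
  · show ((Nat.ldiff 0 _ : Nat) : Int) = 0
    simp [nat_zero_ldiff]

theorem land_neg_one (x : Int) : Int.land x (-1) = x := by
  have h1 : (-1 : Int) = Int.negSucc 0 := rfl
  cases x
  · rw [h1]
    show ((Nat.ldiff _ 0 : Nat) : Int) = _
    rw [nat_ldiff_zero]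
    rfl
  · rw [h1]
    show Int.negSucc (_ ||| 0) = _
    simp

theorem land_lnot_self (x : Int) : Int.land x (Int.lnot x) = 0 := by
  cases x
  · show ((Nat.ldiff _ _ : Nat) : Int) = 0
    rw [nat_ldiff_self]
    rfl
  · show ((Nat.ldiff _ _ : Nat) : Int) = 0
    rw [nat_ldiff_self]
    rfl

theorem lor_zero (x : Int) : Int.lor x 0 = x := by
  cases x
  · show ((_ ||| 0 : Nat) : Int) = _
    simp
  · show Int.negSucc (Nat.ldiff _ 0) = _
    rw [nat_ldiff_zero]

theorem lxor_zero (x : Int) : Int.xor x 0 = x := by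
  cases x
  · show ((_ ^^^ 0 : Nat) : Int) = _
    simp
  · show Int.negSucc (_ ^^^ 0) = _
    simp

theorem one_eq_bit : (1 : Int) = Int.bit true 0 := by simp [Int.bit_val]

theorem one_shl (i : Nat) : (1 : Int) <<< i = ((2 ^ i : Nat) : Int) := by
  have h : (1 : Int) = ((1 : Nat) : Int) := rfl
  rw [h, ← Int.natCast_shiftLeft]
  norm_num [Nat.shiftLeft_eq]

theorem pow_cast_zero : ((2 ^ 0 : Nat) : Int) = Int.bit true 0 := by simp [Int.bit_val]

theorem pow_cast_succ (i : Nat) : ((2 ^ (i + 1) : Nat) : Int) = Int.bit false ((2 ^ i : Nat) : Int) := by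
  rw [bit_false]
  push_cast [pow_succ]
  ring

-- ---- get_bit in terms of Int.bit ----

theorem get_bit_eq (x : Int) (i : Nat) : get_bit x i = (Int.land x ((2 ^ i : Nat) : Int) != 0) := by
  unfold get_bit
  rw [one_shl, band_eq_land]

theorem get_bit_bit_zero (b : Bool) (n : Int) : get_bit (Int.bit b n) 0 = b := by
  rw [get_bit_eq, pow_cast_zero, Int.land_bit, land_zero]
  cases b <;> simp [bne_iff_ne, bit_eq_zero]

theorem bit_false_bne_zero (X : Int) : (Int.bit false X != 0) = (X != 0) := by
  by_cases h : X = 0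
  · simp [h, bit_eq_zero]
  · have h1 : (Int.bit false X != 0) = true := by simp [bne_iff_ne, bit_eq_zero, h]
    have h2 : (X != 0) = true := by simp [bne_iff_ne, h]
    rw [h1, h2]

theorem get_bit_bit_succ (b : Bool) (n : Int) (i : Nat) : get_bit (Int.bit b n) (i + 1) = get_bit n i := by
  rw [get_bit_eq, get_bit_eq, pow_cast_succ, Int.land_bit]
  simp only [Bool.and_false]
  exact bit_false_bne_zero _

theorem get_bit_eq_testBit (i : Nat) : ∀ x : Int, get_bit x i = x.testBit i := by
  induction i with
  | zero =>
    intro x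
    conv_lhs => rw [← Int.bit_decomp x]
    conv_rhs => rw [← Int.bit_decomp x]
    rw [get_bit_bit_zero, Int.testBit_bit_zero]
  | succ i ih =>
    intro x
    conv_lhs => rw [← Int.bit_decomp x]
    conv_rhs => rw [← Int.bit_decomp x]
    rw [get_bit_bit_succ, Int.testBit_bit_succ, ih]

-- ---- loop lemmas ----

theorem findSet_step (bits : Int) (f i : Nat) :
    nbFindSet bits (f + 1) i = if get_bit bits i then i else nbFindSet bits f (i + 1) := rfl

theorem findClear_step (bits : Int) (f i : Nat) :
    nbFindClear bits (f + 1) i = if get_bit bits i then nbFindClear bits f (i + 1) else i := rfl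

theorem findSet_shift (b : Bool) (n : Int) : ∀ f i, nbFindSet (Int.bit b n) f (i + 1) = nbFindSet n f i + 1 := by
  intro f
  induction f with
  | zero => intro i; rfl
  | succ f ih =>
    intro i
    rw [findSet_step, findSet_step, get_bit_bit_succ]
    split <;> simp [ih]

theorem findClear_shift (b : Bool) (n : Int) : ∀ f i, nbFindClear (Int.bit b n) f (i + 1) = nbFindClear n f i + 1 := by
  intro f
  induction f with
  | zero => intro i; rfl
  | succ f ih =>
    intro i
    rw [findClear_step, findClear_step, get_bit_bit_succ]
    split <;> simp [ih]

theorem findSet_stable_succ (bits : Int) : ∀ f i, get_bit bits (nbFindSet bits f i) = true →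
    nbFindSet bits (f + 1) i = nbFindSet bits f i := by
  intro f
  induction f with
  | zero =>
    intro i h
    simp only [nbFindSet] at h ⊢
    simp [h]
  | succ f ih =>
    intro i h
    by_cases hg : get_bit bits i
    · rw [findSet_step, if_pos hg, findSet_step, if_pos hg]
    · rw [findSet_step, if_neg hg] at h
      rw [findSet_step, if_neg hg]
      conv_rhs => rw [findSet_step, if_neg hg]
      exact ih _ h

theorem findSet_stable (bits : Int) (f f' i : Nat) (hle : f ≤ f')
    (h : get_bit bits (nbFindSet bits f i) = true) :
    nbFindSet bits f' i = nbFindSet bits f i := by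
  induction f', hle using Nat.le_induction with
  | base => rfl
  | succ f' hle ih =>
    have h' : get_bit bits (nbFindSet bits f' i) = true := by rw [ih]; exact h
    rw [findSet_stable_succ bits f' i h', ih]

theorem findClear_stable_succ (bits : Int) : ∀ f i, get_bit bits (nbFindClear bits f i) = false →
    nbFindClear bits (f + 1) i = nbFindClear bits f i := by
  intro f
  induction f with
  | zero =>
    intro i h
    simp only [nbFindClear] at h ⊢
    simp [h]
  | succ f ih =>
    intro i h
    by_cases hg : get_bit bits i
    · rw [findClear_step, if_pos hg] at h
      rw [findClear_step, if_pos hg]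
      conv_rhs => rw [findClear_step, if_pos hg]
      exact ih _ h
    · rw [findClear_step, if_neg hg, findClear_step, if_neg hg]

theorem findClear_stable (bits : Int) (f f' i : Nat) (hle : f ≤ f')
    (h : get_bit bits (nbFindClear bits f i) = false) :
    nbFindClear bits f' i = nbFindClear bits f i := by
  induction f', hle using Nat.le_induction with
  | base => rfl
  | succ f' hle ih =>
    have h' : get_bit bits (nbFindClear bits f' i) = false := by rw [ih]; exact h
    rw [findClear_stable_succ bits f' i h', ih]

theorem findSet_succeeds (bits : Int) : ∀ f i, (∃ d, d < f ∧ get_bit bits (i + d) = true) →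
    get_bit bits (nbFindSet bits f i) = true := by
  intro f
  induction f with
  | zero => rintro i ⟨d, hd, _⟩; omega
  | succ f ih =>
    rintro i ⟨d, hd, hbit⟩
    rw [findSet_step]
    by_cases hg : get_bit bits i
    · simpa [hg]
    · rw [if_neg hg]
      apply ih
      have hd0 : d ≠ 0 := by
        intro h0
        rw [h0, Nat.add_zero] at hbit
        exact hg hbit
      exact ⟨d - 1, by omega, by rw [show i + 1 + (d - 1) = i + d by omega]; exact hbit⟩

theorem findClear_succeeds (bits : Int) : ∀ f i, (∃ d, d < f ∧ get_bit bits (i + d) = false) →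
    get_bit bits (nbFindClear bits f i) = false := by
  intro f
  induction f with
  | zero => rintro i ⟨d, hd, _⟩; omega
  | succ f ih =>
    rintro i ⟨d, hd, hbit⟩
    rw [findClear_step]
    by_cases hg : get_bit bits i
    · rw [if_pos hg]
      apply ih
      have hd0 : d ≠ 0 := by
        intro h0
        rw [h0, Nat.add_zero] at hbit
        rw [hbit] at hg
        exact Bool.noConfusion hg
      exact ⟨d - 1, by omega, by rw [show i + 1 + (d - 1) = i + d by omega]; exact hbit⟩
    · simpa [hg] using (Bool.not_eq_true _).mp hg

-- ---- existence of a set/clear bit within the fuel bound ----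

theorem exists_set_bit (x : Int) (hx : x ≠ 0) (hb : x.natAbs ≤ 2 ^ 31) :
    ∃ d, d < 63 ∧ get_bit x d = true := by
  cases x with
  | ofNat N =>
    have hN : N ≠ 0 := by
      intro h
      exact hx (by simp [h])
    have hNb : N ≤ 2 ^ 31 := by simpa using hb
    by_contra hc
    push_neg at hc
    apply hN
    apply Nat.zero_of_testBit_eq_false
    intro i
    by_cases hi : i < 63
    · have := hc i hi
      rw [get_bit_eq_testBit] at this
      simpa using this
    · apply Nat.testBit_lt_two_pow
      calc N ≤ 2 ^ 31 := hNb
        _ < 2 ^ 63 := by norm_num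
        _ ≤ 2 ^ i := Nat.pow_le_pow_right (by norm_num) (by omega)
  | negSucc m =>
    refine ⟨32, by omega, ?_⟩
    rw [get_bit_eq_testBit]
    show (!m.testBit 32) = true
    have hm : m < 2 ^ 32 := by
      have : m + 1 ≤ 2 ^ 31 := by simpa [Int.natAbs] using hb
      calc m < m + 1 := by omega
        _ ≤ 2 ^ 31 := this
        _ ≤ 2 ^ 32 := by norm_num
    rw [Nat.testBit_lt_two_pow hm]
    rfl

theorem exists_clear_bit (x : Int) (hx : x ≠ -1) (hb : x.natAbs ≤ 2 ^ 33) :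
    ∃ d, d < 63 ∧ get_bit x d = false := by
  cases x with
  | ofNat N =>
    refine ⟨34, by omega, ?_⟩
    rw [get_bit_eq_testBit]
    show N.testBit 34 = false
    apply Nat.testBit_lt_two_pow
    have hNb : N ≤ 2 ^ 33 := by simpa using hb
    calc N ≤ 2 ^ 33 := hNb
      _ < 2 ^ 34 := by norm_num
  | negSucc m =>
    have hm0 : m ≠ 0 := by
      intro h
      exact hx (by rw [h]; decide)
    have hmb : m < 2 ^ 33 := by
      have : m + 1 ≤ 2 ^ 33 := by simpa [Int.natAbs] using hb
      omega
    by_contra hc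
    push_neg at hc
    apply hm0
    apply Nat.zero_of_testBit_eq_false
    intro i
    by_cases hi : i < 63
    · have := hc i hi
      rw [get_bit_eq_testBit] at this
      simp only [Int.testBit] at this
      simpa using this
    · apply Nat.testBit_lt_two_pow
      calc m < 2 ^ 33 := hmb
        _ ≤ 2 ^ i := Nat.pow_le_pow_right (by norm_num) (by omega)

-- ---- helper computations on bit forms ----

theorem clear_bit_bit (b : Bool) (n : Int) (k : Nat) :
    clear_bit (Int.bit b n) (k + 1) = Int.bit b (clear_bit n k) := by
  unfold clear_bit
  rw [one_shl, one_shl, band_eq_land, band_eq_land, not_eq_lnot, not_eq_lnot,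
    pow_cast_succ, Int.lnot_bit, Int.land_bit]
  simp

theorem set_bit_bit (b : Bool) (n : Int) (k : Nat) :
    set_bit (Int.bit b n) (k + 1) = Int.bit b (set_bit n k) := by
  unfold set_bit
  rw [one_shl, one_shl, bor_eq_lor, bor_eq_lor, pow_cast_succ, Int.lor_bit]
  simp

theorem clear_bit_zero_bit (b : Bool) (n : Int) :
    clear_bit (Int.bit b n) 0 = Int.bit false n := by
  unfold clear_bit
  rw [one_shl, band_eq_land, not_eq_lnot, pow_cast_zero, Int.lnot_bit]
  have h2 : Int.lnot 0 = -1 := rfl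
  rw [h2, Int.land_bit, land_neg_one]
  simp

theorem set_bit_zero_bit (b : Bool) (n : Int) :
    set_bit (Int.bit b n) 0 = Int.bit true n := by
  unfold set_bit
  rw [one_shl, bor_eq_lor, pow_cast_zero, Int.lor_bit, lor_zero]
  simp

-- ---- A-side recurrences ----

theorem A_even (n : Int) (hn : n ≠ 0) (hb : n.natAbs ≤ 2 ^ 31) :
    next_biggest (Int.bit false n) = Int.bit false (next_biggest n) := by
  have hbitne : Int.bit false n ≠ 0 := by
    rw [Ne, bit_eq_zero]
    tauto
  have hsucc : get_bit n (nbFindSet n 63 0) = true := by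
    apply findSet_succeeds
    obtain ⟨d, hd, hgb⟩ := exists_set_bit n hn hb
    exact ⟨d, hd, by simpa using hgb⟩
  have e1 : nbFindSet (Int.bit false n) 64 0 = nbFindSet n 64 0 + 1 := by
    rw [show (64 : Nat) = 63 + 1 from rfl, findSet_step,
      if_neg (by rw [get_bit_bit_zero]; exact Bool.false_ne_true),
      show (0 : Nat) + 1 = 0 + 1 from rfl, findSet_shift]
    rw [findSet_stable n 63 (63 + 1) 0 (by omega) hsucc]
  simp only [next_biggest, if_neg hbitne, if_neg hn]
  rw [e1, clear_bit_bit, show nbFindSet n 64 0 + 1 + 1 = (nbFindSet n 64 0 + 1) + 1 from rfl,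
    findClear_shift, set_bit_bit]

theorem A_one_mod_four (m : Int) :
    next_biggest (Int.bit true (Int.bit false m)) = Int.bit true (Int.bit false m) + 1 := by
  have hne : Int.bit true (Int.bit false m) ≠ 0 := by
    rw [Ne, bit_eq_zero]
    simp
  have e1 : nbFindSet (Int.bit true (Int.bit false m)) 64 0 = 0 := by
    rw [show (64 : Nat) = 63 + 1 from rfl, findSet_step, if_pos (by rw [get_bit_bit_zero])]
  simp only [next_biggest, if_neg hne]
  rw [e1, clear_bit_zero_bit]
  have e2 : nbFindClear (Int.bit false (Int.bit false m)) 64 (0 + 1) = 1 := by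
    rw [findClear_shift, show (64 : Nat) = 63 + 1 from rfl, findClear_step,
      if_neg (by rw [get_bit_bit_zero]; exact Bool.false_ne_true)]
  rw [e2, show (1 : Nat) = 0 + 1 from rfl, set_bit_bit, set_bit_zero_bit]
  simp [Int.bit_val]
  ring

theorem A_three_mod_four (d : Int) (hd : d ≠ -1) (hb : d.natAbs ≤ 2 ^ 31) :
    next_biggest (Int.bit true (Int.bit true d)) = 2 * next_biggest (Int.bit true d) + 2 := by
  have hne : Int.bit true (Int.bit true d) ≠ 0 := by rw [Ne, bit_eq_zero]; simp
  have hne2 : Int.bit true d ≠ 0 := by rw [Ne, bit_eq_zero]; simp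
  have hsucc : get_bit d (nbFindClear d 63 0) = false := by
    apply findClear_succeeds
    obtain ⟨e, he, hgb⟩ := exists_clear_bit d hd (by omega)
    exact ⟨e, he, by simpa using hgb⟩
  -- LHS
  have l1 : nbFindSet (Int.bit true (Int.bit true d)) 64 0 = 0 := by
    rw [show (64 : Nat) = 63 + 1 from rfl, findSet_step, if_pos (by rw [get_bit_bit_zero])]
  have l2 : nbFindClear (Int.bit false (Int.bit true d)) 64 (0 + 1) = nbFindClear d 63 0 + 2 := by
    rw [findClear_shift, show (64 : Nat) = 63 + 1 from rfl, findClear_step,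
      if_pos (by rw [get_bit_bit_zero]), show (0 : Nat) + 1 = 0 + 1 from rfl, findClear_shift]
  -- RHS
  have r1 : nbFindSet (Int.bit true d) 64 0 = 0 := by
    rw [show (64 : Nat) = 63 + 1 from rfl, findSet_step, if_pos (by rw [get_bit_bit_zero])]
  have r2 : nbFindClear (Int.bit false d) 64 (0 + 1) = nbFindClear d 63 0 + 1 := by
    rw [findClear_shift]
    rw [findClear_stable d 63 64 0 (by omega) hsucc]
  simp only [next_biggest, if_neg hne, if_neg hne2]
  rw [l1, r1, clear_bit_zero_bit, clear_bit_zero_bit, l2, r2,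
    show nbFindClear d 63 0 + 2 = (nbFindClear d 63 0 + 1) + 1 from rfl,
    set_bit_bit false (Int.bit true d) (nbFindClear d 63 0 + 1),
    set_bit_bit true d (nbFindClear d 63 0),
    set_bit_bit false d (nbFindClear d 63 0)]
  rw [bit_false, bit_true, bit_false]
  ring

-- ---- B-side recurrences ----

theorem B_even (n : Int) (hn : n ≠ 0) :
    next_biggest_alt (Int.bit false n) = Int.bit false (next_biggest_alt n) := by
  have hbitne : Int.bit false n ≠ 0 := by rw [Ne, bit_eq_zero]; tauto
  simp only [next_biggest_alt, if_neg hbitne, if_neg hn]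
  rw [band_eq_land, band_eq_land, band_eq_land, band_eq_land, bor_eq_lor, bor_eq_lor,
    bxor_eq_lxor, bxor_eq_lxor, not_eq_lnot, not_eq_lnot]
  rw [neg_bit_false, Int.land_bit]
  simp only [Bool.and_self]
  have hadd : Int.bit false n + Int.bit false (Int.land n (-n)) = Int.bit false (n + Int.land n (-n)) := by
    rw [bit_false, bit_false, bit_false]
    ring
  rw [hadd, Int.lxor_bit, Int.lnot_bit, Int.land_bit, Int.lor_bit]
  simp

theorem B_one_mod_four (m : Int) :
    next_biggest_alt (Int.bit true (Int.bit false m)) = Int.bit true (Int.bit false m) + 1 := by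
  have hne : Int.bit true (Int.bit false m) ≠ 0 := by rw [Ne, bit_eq_zero]; simp
  simp only [next_biggest_alt, if_neg hne]
  rw [band_eq_land, band_eq_land, bor_eq_lor, bxor_eq_lxor, not_eq_lnot]
  have hneg : -(Int.bit true (Int.bit false m)) = Int.bit true (Int.bit true (Int.lnot m)) := by
    rw [neg_bit_true, Int.lnot_bit]
    simp
  have hlb : Int.land (Int.bit true (Int.bit false m)) (Int.bit true (Int.bit true (Int.lnot m))) = (1 : Int) := by
    rw [Int.land_bit, Int.land_bit, land_lnot_self]
    simp [Int.bit_val]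
  rw [hneg, hlb]
  have hx1 : Int.xor (Int.bit true (Int.bit false m)) 1 = Int.bit false (Int.bit false m) := by
    rw [one_eq_bit, Int.lxor_bit, lxor_zero]
    simp
  have hadd : Int.bit true (Int.bit false m) + 1 = Int.bit false (Int.bit true m) := by
    rw [bit_true, bit_false, bit_false, bit_true]
    ring
  have hnot : Int.lnot (Int.bit true (Int.bit false m)) = Int.bit false (Int.bit true (Int.lnot m)) := by
    rw [Int.lnot_bit, Int.lnot_bit]
    simp
  have hx2 : Int.land (Int.bit false (Int.bit true m)) (Int.bit false (Int.bit true (Int.lnot m))) = Int.bit false (Int.bit true 0) := by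
    rw [Int.land_bit, Int.land_bit, land_lnot_self]
    simp
  have hres : Int.lor (Int.bit false (Int.bit false m)) (Int.bit false (Int.bit true 0)) = Int.bit false (Int.bit true m) := by
    rw [Int.lor_bit, Int.lor_bit, lor_zero]
    simp
  rw [hx1, hadd, hnot, hx2, hres]

theorem B_three_mod_four (d : Int) :
    next_biggest_alt (Int.bit true (Int.bit true d)) = 2 * next_biggest_alt (Int.bit true d) + 2 := by
  have hne : Int.bit true (Int.bit true d) ≠ 0 := by rw [Ne, bit_eq_zero]; simp
  have hne2 : Int.bit true d ≠ 0 := by rw [Ne, bit_eq_zero]; simp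
  simp only [next_biggest_alt, if_neg hne, if_neg hne2]
  rw [band_eq_land, band_eq_land, band_eq_land, band_eq_land, bor_eq_lor, bor_eq_lor,
    bxor_eq_lxor, bxor_eq_lxor, not_eq_lnot, not_eq_lnot]
  have hlb : ∀ x : Int, Int.land (Int.bit true x) (-(Int.bit true x)) = 1 := by
    intro x
    rw [neg_bit_true, Int.land_bit, land_lnot_self]
    simp [Int.bit_val]
  rw [hlb (Int.bit true d), hlb d]
  have hx1 : ∀ x : Int, Int.xor (Int.bit true x) 1 = Int.bit false x := by
    intro x
    rw [one_eq_bit, Int.lxor_bit, lxor_zero]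
    simp
  rw [hx1 (Int.bit true d), hx1 d]
  have haddo : ∀ x : Int, Int.bit true x + 1 = Int.bit false (x + 1) := by
    intro x
    rw [bit_true, bit_false]
    ring
  rw [haddo (Int.bit true d), haddo d]
  have hnot : ∀ x : Int, Int.lnot (Int.bit true x) = Int.bit false (Int.lnot x) := by
    intro x
    rw [Int.lnot_bit]
    simp
  rw [hnot (Int.bit true d), hnot d]
  simp only [Int.land_bit, Int.lor_bit, Bool.and_self, Bool.false_and, Bool.and_false,
    Bool.or_self, Bool.false_or, Bool.or_false]
  simp only [bit_false, bit_true]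
  ring

-- ---- Pre_ unpacking ----

theorem bitCount_two_pow : ∀ k : Nat, PySem.Int.bitCount ((2 : Int) ^ k) = 1 := by
  intro k
  induction k with
  | zero =>
    show PySem.Int.bitCount ((2 : Int) ^ 0) = 1
    have h := PySem.Int.bitCount_natCast (show 0 < 1 by norm_num)
    norm_num at h ⊢
    simpa [PySem.Int.bitCount_zero] using h
  | succ k ih =>
    have h := PySem.Int.bitCount_natCast (show 0 < 2 ^ (k + 1) by positivity)
    have hcast : ((2 ^ (k + 1) : Nat) : Int) = (2 : Int) ^ (k + 1) := by push_cast; ring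
    have hdiv : (2 ^ (k + 1) : Nat) / 2 = 2 ^ k := by
      rw [pow_succ]
      exact Nat.mul_div_cancel _ (by norm_num)
    have hmod : (2 ^ (k + 1) : Nat) % 2 = 0 := by
      rw [pow_succ]
      omega
    rw [hcast, hdiv, hmod] at h
    have hcast2 : ((2 ^ k : Nat) : Int) = (2 : Int) ^ k := by push_cast; ring
    rw [hcast2] at h
    rw [h, ih]

theorem pre_to_pow (bits : Int) (hpre : Pre_next_biggest bits) : ∀ k : Nat, bits ≠ -(2 ^ k) := by
  intro k h
  apply hpre.2
  constructor
  · rw [h]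
    have : (0 : Int) < 2 ^ k := by positivity
    omega
  · rw [h]
    have hneg : PySem.Int.bitCount (-((2 : Int) ^ k)) = PySem.Int.bitCount ((2 : Int) ^ k) :=
      PySem.Int.bitCount_neg _
    rw [hneg, bitCount_two_pow]

-- ---- main induction ----

theorem main_equiv : ∀ N : Nat, ∀ bits : Int, bits.natAbs = N → bits.natAbs ≤ 2 ^ 31 →
    bits ≠ 0 → (∀ k : Nat, bits ≠ -(2 ^ k)) → next_biggest bits = next_biggest_alt bits := by
  intro N
  induction N using Nat.strong_induction_on with
  | _ N ih =>
    intro bits hN hbound hne hpow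
    have hdec := Int.bit_decomp bits
    cases hb0 : bits.bodd with
    | false =>
      rw [hb0] at hdec
      set n := bits.div2 with hn_def
      have hval : bits = 2 * n := by rw [← hdec, bit_false]
      have hn0 : n ≠ 0 := by intro h; rw [h] at hval; simp at hval; exact hne hval
      have hb1 : n.natAbs ≤ 2 ^ 31 := by omega
      have hlt : n.natAbs < N := by omega
      have hpow_n : ∀ k : Nat, n ≠ -(2 ^ k) := by
        intro k h
        exact hpow (k + 1) (by rw [hval, h]; ring)
      rw [← hdec, A_even n hn0 hb1, B_even n hn0,
        ih n.natAbs hlt n rfl hb1 hn0 hpow_n]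
    | true =>
      rw [hb0] at hdec
      set b := bits.div2 with hb_def
      have hvalb : bits = 2 * b + 1 := by rw [← hdec, bit_true]
      have hdecb := Int.bit_decomp b
      cases hb1 : b.bodd with
      | false =>
        rw [hb1] at hdecb
        rw [← hdec, ← hdecb, A_one_mod_four, B_one_mod_four]
      | true =>
        rw [hb1] at hdecb
        set d := b.div2 with hd_def
        have hvald : b = 2 * d + 1 := by rw [← hdecb, bit_true]
        have hne1 : bits ≠ -1 := by
          have h := hpow 0
          simpa using h
        have hd1 : d ≠ -1 := by
          intro h
          rw [h] at hvald
          rw [hvald] at hvalb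
          exact hne1 (by omega)
        have hdb : d.natAbs ≤ 2 ^ 31 := by omega
        have hbne0 : b ≠ 0 := by omega
        have hblt : b.natAbs < N := by omega
        have hbb : b.natAbs ≤ 2 ^ 31 := by omega
        have hpow_b : ∀ k : Nat, b ≠ -(2 ^ k) := by
          intro k h
          rcases Nat.eq_zero_or_pos k with h0 | h0
          · rw [h0] at h
            simp at h
            rw [h] at hvald
            exact hd1 (by omega)
          · have : (2 : Int) ^ k = 2 * 2 ^ (k - 1) := by
              rw [← pow_succ']
              congr 1
              omega
            omega
        rw [← hdec, ← hdecb, A_three_mod_four d hd1 hdb, B_three_mod_four d, hdecb,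
          ih b.natAbs hblt b rfl hbb hbne0 hpow_b]

-- ===== VERDICT (by name: the statement is the Claim_ definition above) =====
theorem next_biggest_spec : Claim_equal_next_biggest := by
  intro bits hdom hpre
  unfold Spec_next_biggest
  have hb : bits.natAbs ≤ 2 ^ 31 := by
    unfold Dom_next_biggest pvDomInt at hdom
    simp only [decide_eq_true_eq] at hdom
    omega
  exact main_equiv bits.natAbs bits rfl hb hpre.1 (pre_to_pow bits hpre)
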